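-- pv_equiv track=rewrite | github.com/keptmodel/KEPT | GraphCodeBERT/common/data_processing.py | get_hunks_from_diff
-- ===== SOURCE A (Python) =====
-- def get_hunks_from_diff(diff:str):
--     lines = diff.split('\n')
--     hunks = []
--     current_hunk = []
--
--
--     for line in lines:
--
--         if line.startswith('@@'):
--
--             if current_hunk:
--                 hunks.append('\n'.join(current_hunk))
--                 current_hunk = []
--
--         current_hunk.append(line)
--
--
--     if current_hunk:
--         hunks.append('\n'.join(current_hunk))
--     return hunks
-- ===== SOURCE B (Python) =====
-- def get_hunks_from_diff(diff: str):
--     lines = diff.split('\n')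
--     n = len(lines)
--     hunks = []
--     i = 0
--     while i < n:
--         j = i + 1
--         while j < n and not lines[j].startswith('@@'):
--             j += 1
--         hunks.append('\n'.join(lines[i:j]))
--         i = j
--     return hunks
-- ===== Notes on version B (the rewrite author's own statement) =====
-- stated objective: alternative
-- what changed: Replaces the accumulate-and-flush loop over lines with a two-pointer index scan: the outer pointer marks a segment start, the inner pointer scans to the next @@ header, and each hunk is produced by joining the slice lines[i:j] directly.
import Mathlib
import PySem

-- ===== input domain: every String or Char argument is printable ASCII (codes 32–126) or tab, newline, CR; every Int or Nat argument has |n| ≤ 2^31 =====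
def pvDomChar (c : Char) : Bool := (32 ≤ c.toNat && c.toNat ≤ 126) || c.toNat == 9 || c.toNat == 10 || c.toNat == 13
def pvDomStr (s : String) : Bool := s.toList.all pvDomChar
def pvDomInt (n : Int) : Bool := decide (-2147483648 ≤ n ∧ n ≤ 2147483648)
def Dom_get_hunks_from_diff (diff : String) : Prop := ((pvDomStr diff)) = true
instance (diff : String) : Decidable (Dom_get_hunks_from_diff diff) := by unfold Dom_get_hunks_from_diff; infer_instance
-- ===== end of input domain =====

-- B replaces A's accumulate-and-flush loop with a two-pointer index scan that joins slices; same cost, different decomposition.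

-- ===== PORT A =====
-- loop body of A's `for line in lines` (state = (hunks, current_hunk))
def pvStepA (st : List String × List String) (line : String) : List String × List String :=
  let st :=
    if PySem.Str.startswith line "@@" = true then
      if st.2 ≠ [] then (st.1 ++ [PySem.Str.join "\n" st.2], ([] : List String)) else st
    else st
  (st.1, st.2 ++ [line])

def get_hunks_from_diff (diff : String) : List String :=
  -- sep "\n" ≠ "", so split? is always `some`; the getD default is never used
  let lines := (PySem.Str.split? diff "\n").getD []
  let st := lines.foldl pvStepA ([], [])
  if st.2 ≠ [] then st.1 ++ [PySem.Str.join "\n" st.2] else st.1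

-- ===== PORT B =====
-- inner while loop of Source B: advance j to the next '@@' header (or to n)
def pvInnerB (lines : List String) (n j : Nat) : Nat :=
  if h : j < n ∧ ¬ (PySem.Str.startswith (PySem.List.pyGetD lines (j : Int) "") "@@" = true) then
    pvInnerB lines n (j + 1)
  else j
termination_by n - j
decreasing_by omega

-- the port's outer loop cites this for termination
theorem pvInnerB_ge (lines : List String) (n j : Nat) : j ≤ pvInnerB lines n j := by
  unfold pvInnerB
  split
  · exact le_trans (by omega) (pvInnerB_ge lines n (j + 1))
  · exact le_refl j
termination_by n - j
decreasing_by omega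

-- outer while loop of Source B
def pvOuterB (lines : List String) (n i : Nat) (hunks : List String) : List String :=
  if _h : i < n then
    let j := pvInnerB lines n (i + 1)
    pvOuterB lines n j
      (hunks ++ [PySem.Str.join "\n" (PySem.List.slice lines (some (i : Int)) (some (j : Int)))])
  else hunks
termination_by n - i
decreasing_by exact Nat.sub_lt_sub_left _h (lt_of_lt_of_le (Nat.lt_succ_self i) (pvInnerB_ge lines n (i + 1)))

def get_hunks_from_diff_alt (diff : String) : List String :=
  -- sep "\n" ≠ "", so split? is always `some`; the getD default is never used
  let lines := (PySem.Str.split? diff "\n").getD []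
  pvOuterB lines lines.length 0 []

-- ===== PRECONDITION & SPEC =====
def Spec_get_hunks_from_diff (diff : String) (out : List String) : Prop := out = get_hunks_from_diff_alt diff
instance (diff : String) (out : List String) : Decidable (Spec_get_hunks_from_diff diff out) := by unfold Spec_get_hunks_from_diff; infer_instance

-- ===== CLAIM (what is proved, stated in full; the proofs are below) =====
def Claim_equal_get_hunks_from_diff : Prop := ∀ (diff : String), Dom_get_hunks_from_diff diff → Spec_get_hunks_from_diff diff (get_hunks_from_diff diff)

-- ===== LEMMAS AND PROOFS =====

-- "not a hunk header" predicate
def pvNH (l : String) : Bool := !(PySem.Str.startswith l "@@")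

-- canonical grouping: each group is its first line plus the following non-header lines
def pvGrp : List String → List (List String)
  | [] => []
  | l :: rest => (l :: rest.takeWhile pvNH) :: pvGrp (rest.dropWhile pvNH)
termination_by ls => ls.length
decreasing_by exact Nat.lt_succ_of_le (List.length_dropWhile_le _ _)

theorem pv_take_takeWhile {α : Type} (p : α → Bool) (l : List α) :
    l.take (l.takeWhile p).length = l.takeWhile p := by
  induction l with
  | nil => rfl
  | cons x xs ih =>
    by_cases h : p x = true
    · simp [h, ih]
    · simp [h]

theorem pv_drop_takeWhile {α : Type} (p : α → Bool) (l : List α) :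
    l.drop (l.takeWhile p).length = l.dropWhile p := by
  induction l with
  | nil => rfl
  | cons x xs ih =>
    by_cases h : p x = true
    · simp [h, ih]
    · simp [h]

-- A-side invariant
theorem pvA_inv (ls : List String) : ∀ cur hunks : List String, cur ≠ [] →
    (let st := ls.foldl pvStepA (hunks, cur)
     if st.2 ≠ [] then st.1 ++ [PySem.Str.join "\n" st.2] else st.1)
    = hunks ++ (((cur ++ ls.takeWhile pvNH) :: pvGrp (ls.dropWhile pvNH)).map (PySem.Str.join "\n")) := by
  induction ls with
  | nil => intro cur hunks hcur; simp [pvGrp, hcur]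
  | cons l ls ih =>
    intro cur hunks hcur
    by_cases h : PySem.Str.startswith l "@@" = true
    · have hc : PySem.Chars.startswith l.toList ['@', '@'] = true := by simpa using h
      have hstep : pvStepA (hunks, cur) l = (hunks ++ [PySem.Str.join "\n" cur], [l]) := by
        simp [pvStepA, hc, hcur]
      simp only [List.foldl_cons, hstep]
      rw [ih [l] _ (by simp)]
      simp [pvNH, hc, pvGrp]
    · have hc : PySem.Chars.startswith l.toList ['@', '@'] = false := by simpa using h
      have hstep : pvStepA (hunks, cur) l = (hunks, cur ++ [l]) := by
        simp [pvStepA, hc]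
      simp only [List.foldl_cons, hstep]
      rw [ih (cur ++ [l]) _ (by simp)]
      simp [pvNH, hc]

-- A's loop computes the canonical grouping
theorem pvA_eq (ls : List String) :
    (let st := ls.foldl pvStepA ([], [])
     if st.2 ≠ [] then st.1 ++ [PySem.Str.join "\n" st.2] else st.1)
    = (pvGrp ls).map (PySem.Str.join "\n") := by
  cases ls with
  | nil => simp [pvGrp]
  | cons l ls =>
    have hstep : pvStepA (([] : List String), ([] : List String)) l = ([], [l]) := by
      simp [pvStepA]
    simp only [List.foldl_cons, hstep]
    rw [pvA_inv ls [l] [] (by simp)]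
    simp [pvGrp]

-- B's inner loop finds the end of the current group
theorem pvInnerB_spec (lines : List String) (n j : Nat) (hn : n = lines.length) (hj : j ≤ n) :
    pvInnerB lines n j = j + ((lines.drop j).takeWhile pvNH).length := by
  unfold pvInnerB
  split
  · rename_i h
    obtain ⟨hlt, hns⟩ := h
    have hjl : j < lines.length := by omega
    have hget : PySem.List.pyGetD lines (j : Int) "" = lines[j] := by
      simp [PySem.List.pyGetD_natCast, List.getD, hjl]
    rw [hget] at hns
    have hnh : pvNH lines[j] = true := by simp [pvNH]; simpa using hns
    have hdrop : lines.drop j = lines[j] :: lines.drop (j + 1) :=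
      List.drop_eq_getElem_cons hjl
    rw [pvInnerB_spec lines n (j + 1) hn (by omega), hdrop]
    simp only [List.takeWhile_cons, hnh, if_true, List.length_cons]
    omega
  · rename_i h
    rcases Nat.lt_or_ge j n with hlt | hge
    · have hjl : j < lines.length := by omega
      have hget : PySem.List.pyGetD lines (j : Int) "" = lines[j] := by
        simp [PySem.List.pyGetD_natCast, List.getD, hjl]
      have hs : PySem.Str.startswith lines[j] "@@" = true := by
        by_contra hc
        exact h ⟨hlt, by rw [hget]; exact hc⟩
      have hnh : pvNH lines[j] = false := by simp [pvNH]; simpa using hs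
      have hdrop : lines.drop j = lines[j] :: lines.drop (j + 1) :=
        List.drop_eq_getElem_cons hjl
      rw [hdrop]
      simp only [List.takeWhile_cons, hnh, Bool.false_eq_true, if_false, List.length_nil]
      omega
    · have : lines.drop j = [] := List.drop_eq_nil_of_le (by omega)
      simp [this]
termination_by n - j
decreasing_by omega

-- B's outer loop computes the canonical grouping of the remaining lines
theorem pvOuterB_spec (lines : List String) (n i : Nat) (hunks : List String)
    (hn : n = lines.length) :
    pvOuterB lines n i hunks = hunks ++ (pvGrp (lines.drop i)).map (PySem.Str.join "\n") := by
  unfold pvOuterB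
  split
  · rename_i h
    have hil : i < lines.length := by omega
    have hj : pvInnerB lines n (i + 1)
        = i + 1 + ((lines.drop (i + 1)).takeWhile pvNH).length :=
      pvInnerB_spec lines n (i + 1) hn (by omega)
    have harith : i + 1 + ((lines.drop (i + 1)).takeWhile pvNH).length - i
        = ((lines.drop (i + 1)).takeWhile pvNH).length + 1 := by omega
    have hdropi : lines.drop i = lines[i] :: lines.drop (i + 1) :=
      List.drop_eq_getElem_cons hil
    have hslice : PySem.List.slice lines (some (i : Int)) (some ((pvInnerB lines n (i + 1) : Nat) : Int))
        = lines[i] :: (lines.drop (i + 1)).takeWhile pvNH := by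
      rw [hj, PySem.List.slice_natCast, harith, hdropi, List.take_succ_cons,
        pv_take_takeWhile]
    have hdropj : lines.drop (pvInnerB lines n (i + 1)) = (lines.drop (i + 1)).dropWhile pvNH := by
      rw [hj, ← List.drop_drop, pv_drop_takeWhile]
    rw [pvOuterB_spec lines n _ _ hn, hslice, hdropj, hdropi]
    rw [show pvGrp (lines[i] :: lines.drop (i + 1))
        = (lines[i] :: (lines.drop (i + 1)).takeWhile pvNH)
          :: pvGrp ((lines.drop (i + 1)).dropWhile pvNH) from by rw [pvGrp]]
    simp [List.append_assoc]
  · rename_i h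
    have : lines.drop i = [] := List.drop_eq_nil_of_le (by omega)
    simp [this, pvGrp]
termination_by n - i
decreasing_by exact Nat.sub_lt_sub_left (by assumption) (lt_of_lt_of_le (Nat.lt_succ_self i) (pvInnerB_ge lines n (i + 1)))

-- ===== VERDICT (by name: the statement is the Claim_ definition above) =====
theorem get_hunks_from_diff_spec : Claim_equal_get_hunks_from_diff := by
  intro diff _
  unfold Spec_get_hunks_from_diff get_hunks_from_diff get_hunks_from_diff_alt
  rw [pvOuterB_spec _ _ _ _ rfl]
  simpa using pvA_eq ((PySem.Str.split? diff "\n").getD [])
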